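-- pv_equiv track=rewrite | github.com/MartinGangand/tradeflow | trade_flow_modelling/src/modelisation/time_series_models/autoregressive_model.py | dispatch_indexes
-- ===== SOURCE A (Python) =====
-- def dispatch_indexes(max_lag, nb_processes):
--     slice_indexes_per_process = [[] for _ in range(nb_processes)]
--     direction = True
--     for i in range(max_lag + 1):
--         args_idx = i % nb_processes
--         new_args_idx = args_idx if direction else nb_processes - 1 - args_idx
--         direction = direction if args_idx != nb_processes - 1 else not(direction)
--         slice_indexes_per_process[new_args_idx].append(i + 1)
--
--     assert(sum([len(l) for l in slice_indexes_per_process]) == max_lag + 1)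
--     return slice_indexes_per_process
-- ===== SOURCE B (Python) =====
-- def dispatch_indexes(max_lag, nb_processes):
--     total = max_lag + 1
--     rows = (total + nb_processes - 1) // nb_processes if nb_processes > 0 else 0
--     result = []
--     for p in range(nb_processes):
--         bucket = []
--         for r in range(rows):
--             v = r * nb_processes + (p if r % 2 == 0 else nb_processes - 1 - p)
--             if v < total:
--                 bucket.append(v + 1)
--         result.append(bucket)
--     return result
-- ===== Notes on version B (the rewrite author's own statement) =====
-- stated objective: simpler
-- what changed: Replaces the toggled direction flag and index-by-index dispatch with a per-bucket construction: for each process p it directly generates its values row by row from the closed form r*nb_processes + (p or nb_processes-1-p by row parity), so no running state threads through the loop.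
import Mathlib
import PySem

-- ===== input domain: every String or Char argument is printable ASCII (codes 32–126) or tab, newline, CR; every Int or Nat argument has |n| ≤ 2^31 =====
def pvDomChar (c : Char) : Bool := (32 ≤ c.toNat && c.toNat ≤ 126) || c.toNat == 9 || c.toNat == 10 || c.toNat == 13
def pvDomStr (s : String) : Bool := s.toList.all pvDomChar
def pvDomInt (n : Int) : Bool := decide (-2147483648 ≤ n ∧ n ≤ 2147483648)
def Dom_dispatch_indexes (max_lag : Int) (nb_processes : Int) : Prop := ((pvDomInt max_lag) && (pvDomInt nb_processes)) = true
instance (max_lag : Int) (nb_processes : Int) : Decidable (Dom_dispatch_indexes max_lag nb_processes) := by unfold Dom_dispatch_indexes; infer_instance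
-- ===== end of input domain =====

-- B replaces A's running direction toggle with a per-process bucket built row by row
-- from the closed-form snake column; objective: simpler state-free decomposition.


-- ===== PORT A =====
-- `xs[idx].append(v)`: exact for 0 ≤ idx < xs.length, which always holds inside
-- Pre_ (idx = i % n or n-1-i % n with n ≥ 1); out of range Python raises (excluded by Pre_).
def pvAppendAt : List (List Int) → Int → Int → List (List Int)
  | [], _, _ => []
  | l :: ls, idx, v => if idx = 0 then (l ++ [v]) :: ls else l :: pvAppendAt ls (idx - 1) v

-- Literal port of A; the final `assert` holds on Pre_ (it fails only for max_lag ≤ -2, excluded).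
def dispatch_indexes (max_lag : Int) (nb_processes : Int) : List (List Int) :=
  let init : List (List Int) := (PySem.List.pyRange 0 nb_processes 1).map (fun _ => [])
  let st := (PySem.List.pyRange 0 (max_lag + 1) 1).foldl
    (fun (st : List (List Int) × Bool) i =>
      let args_idx := PySem.Int.mod i nb_processes
      let new_args_idx := if st.2 then args_idx else nb_processes - 1 - args_idx
      let direction := if args_idx ≠ nb_processes - 1 then st.2 else !st.2
      (pvAppendAt st.1 new_args_idx (i + 1), direction))
    (init, true)
  st.1

-- ===== PORT B =====
def dispatch_indexes_alt (max_lag : Int) (nb_processes : Int) : List (List Int) :=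
  let total := max_lag + 1
  let rows := if nb_processes > 0 then PySem.Int.floordiv (total + nb_processes - 1) nb_processes else 0
  (PySem.List.pyRange 0 nb_processes 1).map (fun p =>
    (PySem.List.pyRange 0 rows 1).foldl
      (fun bucket r =>
        let v := r * nb_processes + (if PySem.Int.mod r 2 = 0 then p else nb_processes - 1 - p)
        if v < total then bucket ++ [v + 1] else bucket)
      ([] : List Int))

-- ===== PRECONDITION & SPEC =====
-- Pre_ is exactly where A returns: nb_processes ≤ 0 raises ZeroDivisionError/IndexError once the
-- loop runs (max_lag ≥ 0), and max_lag ≤ -2 fails the final assert (AssertionError).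
def Pre_dispatch_indexes (max_lag : Int) (nb_processes : Int) : Prop :=
  max_lag ≥ -1 ∧ (1 ≤ nb_processes ∨ max_lag = -1)
instance (max_lag : Int) (nb_processes : Int) : Decidable (Pre_dispatch_indexes max_lag nb_processes) := by unfold Pre_dispatch_indexes; infer_instance

def pvWitness_dispatch_indexes : Int × Int := (9, 3)

def Spec_dispatch_indexes (max_lag : Int) (nb_processes : Int) (out : List (List Int)) : Prop := out = dispatch_indexes_alt max_lag nb_processes
instance (max_lag : Int) (nb_processes : Int) (out : List (List Int)) : Decidable (Spec_dispatch_indexes max_lag nb_processes out) := by unfold Spec_dispatch_indexes; infer_instance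

-- ===== CLAIM (what is proved, stated in full; the proofs are below) =====
def Claim_equal_dispatch_indexes : Prop := ∀ (max_lag : Int) (nb_processes : Int), Dom_dispatch_indexes max_lag nb_processes → Pre_dispatch_indexes max_lag nb_processes → Spec_dispatch_indexes max_lag nb_processes (dispatch_indexes max_lag nb_processes)

-- ===== LEMMAS AND PROOFS =====

-- snake column of index v among N buckets
def snakeIdx (N v : Nat) : Nat := if (v / N) % 2 = 0 then v % N else N - 1 - v % N

-- bucket p after distributing 0..T-1 (values stored +1)
def specBucket (N T p : Nat) : List Int :=
  ((List.range T).filter (fun v => snakeIdx N v = p)).map (fun v => (v : Int) + 1)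

theorem specBucket_zero (N p : Nat) : specBucket N 0 p = [] := by
  simp [specBucket]

theorem specBucket_succ (N k p : Nat) :
    specBucket N (k + 1) p =
      specBucket N k p ++ (if snakeIdx N k = p then [(k : Int) + 1] else []) := by
  simp only [specBucket, List.range_succ, List.filter_append, List.filter_cons]
  by_cases h : snakeIdx N k = p <;> simp [h]

theorem pvAppendAt_map_range {N j : Nat} (f : Nat → List Int) (v : Int) (hj : j < N) :
    pvAppendAt ((List.range N).map f) (j : Int) v =
      (List.range N).map (fun p => if p = j then f p ++ [v] else f p) := by
  induction N generalizing j f with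
  | zero => omega
  | succ n ih =>
    rw [List.range_succ_eq_map]
    simp only [List.map_cons, List.map_map]
    by_cases h0 : j = 0
    · subst h0
      simp [pvAppendAt]
    · have hj' : j - 1 < n := by omega
      have : pvAppendAt (f 0 :: (List.range n).map (f ∘ Nat.succ)) (j : Int) v
          = f 0 :: pvAppendAt ((List.range n).map (f ∘ Nat.succ)) ((j : Int) - 1) v := by
        simp only [pvAppendAt]
        rw [if_neg (by exact_mod_cast h0)]
      rw [this]
      have hcast : ((j : Int) - 1) = ((j - 1 : Nat) : Int) := by omega
      rw [hcast, ih (f ∘ Nat.succ) hj']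
      simp only [if_neg (Ne.symm h0)]
      congr 1
      apply List.map_congr_left
      intro a _
      simp only [Function.comp]
      by_cases h : a = j - 1
      · rw [if_pos h, if_pos (by omega)]
      · rw [if_neg h, if_neg (by omega)]

-- division step: (k+1)/N increments exactly when k mod N = N-1
theorem div_succ_eq (N k : Nat) (hN : 0 < N) :
    (k + 1) / N = k / N + (if k % N = N - 1 then 1 else 0) := by
  have hm := Nat.div_add_mod k N
  have hlt := Nat.mod_lt k hN
  by_cases h : k % N = N - 1
  · rw [if_pos h]
    have : k + 1 = N * (k / N + 1) := by rw [Nat.mul_succ]; omega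
    rw [this, Nat.mul_div_cancel_left _ hN]
  · rw [if_neg h]
    have h2 : k + 1 = N * (k / N) + (k % N + 1) := by omega
    have h3 : k % N + 1 < N := by omega
    rw [h2, Nat.mul_add_div hN, Nat.div_eq_of_lt h3]

-- A's loop invariant: after the first k indexes the state is the spec buckets and row parity
theorem loopA_eq (N : Nat) (hN : 0 < N) (k : Nat) :
    (PySem.List.pyRange 0 (k : Int) 1).foldl
      (fun (st : List (List Int) × Bool) i =>
        let args_idx := PySem.Int.mod i (N : Int)
        let new_args_idx := if st.2 then args_idx else (N : Int) - 1 - args_idx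
        let direction := if args_idx ≠ (N : Int) - 1 then st.2 else !st.2
        (pvAppendAt st.1 new_args_idx (i + 1), direction))
      ((List.range N).map (fun _ => ([] : List Int)), true)
    = ((List.range N).map (fun p => specBucket N k p), decide ((k / N) % 2 = 0)) := by
  induction k with
  | zero =>
    rw [show ((0 : Nat) : Int) = 0 by rfl, PySem.List.pyRange_one_eq_nil (le_refl 0)]
    simp [specBucket_zero]
  | succ k ih =>
    have hk : ((k + 1 : Nat) : Int) = (k : Int) + 1 := by push_cast; ring
    rw [hk, PySem.List.pyRange_one_succ_right (by positivity), List.foldl_append, ih]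
    simp only [List.foldl_cons, List.foldl_nil]
    have hmlt : k % N < N := Nat.mod_lt k hN
    have hsn : snakeIdx N k < N := by
      unfold snakeIdx; split <;> omega
    have hmod : PySem.Int.mod (k : Int) (N : Int) = ((k % N : Nat) : Int) :=
      PySem.Int.mod_natCast k N
    rw [hmod]
    have hnew : (if (decide ((k / N) % 2 = 0)) = true then ((k % N : Nat) : Int)
        else (N : Int) - 1 - ((k % N : Nat) : Int)) = ((snakeIdx N k : Nat) : Int) := by
      unfold snakeIdx
      by_cases hd : (k / N) % 2 = 0
      · simp [hd]
      · simp only [hd, decide_false, if_false, Bool.false_eq_true]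
        push_cast [Nat.sub_sub]
        omega
    rw [hnew, pvAppendAt_map_range _ _ hsn]
    rw [Prod.mk.injEq]
    constructor
    · apply List.map_congr_left
      intro p _
      rw [specBucket_succ]
      by_cases hp : p = snakeIdx N k
      · rw [if_pos hp, if_pos (by omega)]
      · rw [if_neg hp, if_neg (by omega)]
        simp
    · have hds := div_succ_eq N k hN
      by_cases hlast : k % N = N - 1
      · have hne : ¬ (((k % N : Nat) : Int) ≠ (N : Int) - 1) := by push_cast; omega
        rw [if_neg hne]
        rw [if_pos hlast] at hds
        by_cases hd : (k / N) % 2 = 0 <;> simp [hd, hds] <;> omega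
      · have hne : (((k % N : Nat) : Int) ≠ (N : Int) - 1) := by push_cast; omega
        rw [if_pos hne]
        rw [if_neg hlast] at hds
        simp [hds]

-- the column that row k of the snake assigns to bucket p
def rowCol (N k p : Nat) : Nat := if k % 2 = 0 then p else N - 1 - p

theorem rowCol_lt (N k p : Nat) (_hN : 0 < N) (hp : p < N) : rowCol N k p < N := by
  unfold rowCol; split <;> omega

theorem snakeIdx_eq_iff (N k p v : Nat) (_hN : 0 < N) (hp : p < N)
    (h1 : k * N ≤ v) (h2 : v < (k + 1) * N) :
    snakeIdx N v = p ↔ v = k * N + rowCol N k p := by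
  have h2' : v < k * N + N := by rw [Nat.add_mul, Nat.one_mul] at h2; exact h2
  have hdiv : v / N = k := Nat.div_eq_of_lt_le h1 (by rw [Nat.succ_mul]; omega)
  have hda := Nat.div_add_mod v N
  rw [hdiv] at hda
  have hcomm : N * k = k * N := Nat.mul_comm N k
  unfold snakeIdx rowCol
  rw [hdiv]
  by_cases hk : k % 2 = 0 <;> simp only [hk, if_true, if_false] <;> omega

theorem specBucket_extend (N p k : Nat) (hN : 0 < N) (hp : p < N) :
    ∀ m2 m1, k * N ≤ m1 → m1 ≤ m2 → m2 ≤ (k + 1) * N →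
    specBucket N m2 p = specBucket N m1 p ++
      (if m1 ≤ k * N + rowCol N k p ∧ k * N + rowCol N k p < m2
       then [((k * N + rowCol N k p : Nat) : Int) + 1] else []) := by
  intro m2
  induction m2 with
  | zero =>
    intro m1 _ hm _
    have : m1 = 0 := by omega
    subst this
    simp
  | succ m ih =>
    intro m1 ha hb hc
    by_cases hm1 : m1 = m + 1
    · subst hm1
      rw [if_neg (by omega)]
      simp
    · have hb' : m1 ≤ m := by omega
      rw [specBucket_succ, ih m1 ha hb' (by omega), List.append_assoc]
      congr 1
      have hsm : snakeIdx N m = p ↔ m = k * N + rowCol N k p :=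
        snakeIdx_eq_iff N k p m hN hp (by omega) (by omega)
      by_cases hx : m = k * N + rowCol N k p
      · rw [if_pos (hsm.mpr hx), if_neg (by omega), if_pos (by omega)]
        simp [hx]
      · rw [if_neg (fun hcon => hx (hsm.mp hcon))]
        by_cases hlt : m1 ≤ k * N + rowCol N k p ∧ k * N + rowCol N k p < m
        · rw [if_pos hlt, if_pos (by omega)]
          simp
        · rw [if_neg hlt, if_neg (by omega)]
          simp

-- B's inner-loop invariant
theorem loopB_eq (N T : Nat) (hN : 0 < N) (p : Nat) (hp : p < N) (k : Nat) :
    (PySem.List.pyRange 0 (k : Int) 1).foldl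
      (fun bucket r =>
        let v := r * (N : Int) + (if PySem.Int.mod r 2 = 0 then (p : Int) else (N : Int) - 1 - p)
        if v < (T : Int) then bucket ++ [v + 1] else bucket)
      ([] : List Int)
    = specBucket N (min (k * N) T) p := by
  induction k with
  | zero =>
    rw [show ((0 : Nat) : Int) = 0 by rfl, PySem.List.pyRange_one_eq_nil (le_refl 0)]
    simp [specBucket_zero]
  | succ k ih =>
    have hk : ((k + 1 : Nat) : Int) = (k : Int) + 1 := by push_cast; ring
    rw [hk, PySem.List.pyRange_one_succ_right (by positivity), List.foldl_append, ih]
    simp only [List.foldl_cons, List.foldl_nil]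
    have hmod2 : PySem.Int.mod (k : Int) 2 = ((k % 2 : Nat) : Int) := by
      exact_mod_cast PySem.Int.mod_natCast k 2
    rw [hmod2]
    have hcol : (if ((k % 2 : Nat) : Int) = 0 then (p : Int) else (N : Int) - 1 - (p : Int))
        = ((rowCol N k p : Nat) : Int) := by
      unfold rowCol
      by_cases hk2 : k % 2 = 0
      · simp [hk2]
      · simp only [hk2, if_false]
        rw [if_neg (by exact_mod_cast hk2)]
        push_cast [Nat.sub_sub]
        omega
    rw [hcol]
    have hv : (k : Int) * (N : Int) + ((rowCol N k p : Nat) : Int)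
        = ((k * N + rowCol N k p : Nat) : Int) := by push_cast; ring
    rw [hv]
    have hcl : rowCol N k p < N := rowCol_lt N k p hN hp
    by_cases hT : T ≤ k * N
    · have hmin : min (k * N) T = T := by omega
      have hmin2 : min ((k + 1) * N) T = T := by
        rw [Nat.add_mul]; omega
      rw [hmin, hmin2, if_neg (by exact_mod_cast (by omega : ¬ (k * N + rowCol N k p < T)))]
    · have hmin : min (k * N) T = k * N := by omega
      rw [hmin]
      rw [specBucket_extend N p k hN hp (min ((k + 1) * N) T) (k * N)
        (le_refl _) (le_min (by rw [Nat.add_mul]; omega) (by omega)) (min_le_left _ _)]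
      have hcond : (k * N ≤ k * N + rowCol N k p ∧ k * N + rowCol N k p < min ((k + 1) * N) T)
          ↔ (k * N + rowCol N k p < T) := by
        rw [Nat.add_mul]
        omega
      by_cases hc : k * N + rowCol N k p < T
      · rw [if_pos (by exact_mod_cast hc), if_pos (hcond.mpr hc)]
      · rw [if_neg (by exact_mod_cast hc), if_neg (fun hcon => hc (hcond.mp hcon))]
        simp

theorem dispatch_indexes_spec : Claim_equal_dispatch_indexes := by
  intro max_lag nb_processes _ hpre
  unfold Spec_dispatch_indexes dispatch_indexes dispatch_indexes_alt
  obtain ⟨hml, hcase⟩ := hpre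
  by_cases hn : 1 ≤ nb_processes
  · -- main case: nb_processes ≥ 1, max_lag ≥ -1
    lift nb_processes to Nat using (by omega : (0 : Int) ≤ nb_processes) with N
    have hN : 0 < N := by exact_mod_cast hn
    obtain ⟨T, hT⟩ : ∃ T : Nat, max_lag + 1 = (T : Int) := ⟨(max_lag + 1).toNat, by omega⟩
    rw [hT]
    -- A side
    have hinit : (PySem.List.pyRange 0 (N : Int) 1).map (fun _ => ([] : List Int))
        = (List.range N).map (fun _ => ([] : List Int)) := by
      rw [PySem.List.pyRange_one]
      simp only [sub_zero, Int.toNat_natCast, List.map_map]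
      rfl
    rw [hinit, loopA_eq N hN T]
    -- B side
    rw [if_pos (by exact_mod_cast hN)]
    have hsum : (T : Int) + (N : Int) - 1 = ((T + N - 1 : Nat) : Int) := by
      omega
    rw [hsum, PySem.Int.floordiv_natCast (T + N - 1) N]
    rw [show PySem.List.pyRange 0 (N : Int) 1
        = (List.range N).map (fun q => ((q : Nat) : Int)) by
      rw [PySem.List.pyRange_one]; simp]
    rw [List.map_map]
    apply List.map_congr_left
    intro p hp
    have hpN : p < N := List.mem_range.mp hp
    simp only [Function.comp]
    rw [loopB_eq N T hN p hpN ((T + N - 1) / N)]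
    congr 1
    have hda := Nat.div_add_mod (T + N - 1) N
    have hmlt : (T + N - 1) % N < N := Nat.mod_lt _ hN
    have hge : T ≤ (T + N - 1) / N * N := by
      have hcomm : N * ((T + N - 1) / N) = (T + N - 1) / N * N := Nat.mul_comm _ _
      omega
    omega
  · -- nb_processes ≤ 0 forces max_lag = -1: both sides are []
    have hml1 : max_lag = -1 := by tauto
    subst hml1
    rw [PySem.List.pyRange_one_eq_nil (by omega : nb_processes ≤ 0)]
    simp
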